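-- pv_equiv track=rewrite | github.com/IT-coach-666/leetcode-public | leetcode_jy/jy_0001_0500/jy_0051_0100/jy_0065.py | isNumber_v2
-- ===== SOURCE A (Python) =====
-- def isNumber_v2(s: str) -> bool:
--     # DFA transitions: dict[action] -> successor
--     ls_state = [{},
--               # state 1: 初始状态 (空字符串或纯空格)
--               {"blank": 1, "sign": 2, "digit": 3, "dot": 4},
--               # state 2: 符号位
--               {"digit": 3, "dot": 4},
--               # state 3: 数字位 (形如 -164 可以作为结束)
--               {"digit": 3, "dot": 5, "e|E": 6, "blank": 9},
--               # state 4: 小数点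
--               {"digit": 5},
--               # state 5: 小数点后的数字 (形如 .721 或 -123.6 可以作为结束)
--               {"digit": 5, "e|E": 6, "blank": 9},
--               # state 6: 指数 e
--               {"sign": 7, "digit": 8},
--               # state 7: 指数后面的符号位
--               {"digit": 8},
--               # state 8: 指数后面的数字 (形如 +1e-6 可以作为结束)
--               {"digit": 8, "blank": 9},
--               # state 9: 状态 3、5、8 后面多了空格 (主要为了判断 "1 1" 是不合理的)
--               {"blank": 9}]
--
--     def strToAction(st):
--         if '0' <= st <= '9':
--             return "digit"
--         if st in "+-":
--             return "sign"
--         if st in "eE":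
--             return "e|E"
--         if st == '.':
--             return "dot"
--         if st == ' ':
--             return "blank"
--         return None
--
--     currState = 1
--     for c in s:
--         action = strToAction(c)
--         if action not in ls_state[currState]:
--             return False
--         currState = ls_state[currState][action]
--
--     return currState in {3, 5, 8, 9}
-- ===== SOURCE B (Python) =====
-- def _skip_digits(cs):
--     """Split off the maximal run of leading ASCII digits: (run length, remainder)."""
--     k = 0
--     while k < len(cs) and '0' <= cs[k] <= '9':
--         k += 1
--     return k, cs[k:]
--
--
-- def _exp_part(cs):
--     """Accept an empty tail or an exponent '(e|E) [+-] digits+' consuming everything."""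
--     if not cs:
--         return True
--     if cs[0] not in 'eE':
--         return False
--     t = cs[1:]
--     t2 = t[1:] if t[:1] in ('+', '-') else t
--     exp_len, r = _skip_digits(t2)
--     return exp_len != 0 and not r
--
--
-- def isNumber_v2(s: str) -> bool:
--     # Recursive-descent parse of the grammar
--     #   ' '* [+-] ( digits+ ['.' digits*] | '.' digits+ ) [(e|E) [+-] digits+] ' '*
--     cs = s.strip(' ')
--     rest = cs[1:] if cs[:1] in ('+', '-') else cs
--     int_len, rest = _skip_digits(rest)
--     if rest[:1] == '.':
--         frac_len, rest = _skip_digits(rest[1:])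
--     else:
--         frac_len = 0
--     if int_len + frac_len == 0:
--         return False
--     return _exp_part(rest)
-- ===== Notes on version B (the rewrite author's own statement) =====
-- stated objective: alternative
-- what changed: Replaced the table-driven DFA (dict-of-dicts transition table walked character by character) with a recursive-descent parser that strips outer spaces and then consumes sign, integer digits, optional fraction and optional exponent sequentially.
import Mathlib
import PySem

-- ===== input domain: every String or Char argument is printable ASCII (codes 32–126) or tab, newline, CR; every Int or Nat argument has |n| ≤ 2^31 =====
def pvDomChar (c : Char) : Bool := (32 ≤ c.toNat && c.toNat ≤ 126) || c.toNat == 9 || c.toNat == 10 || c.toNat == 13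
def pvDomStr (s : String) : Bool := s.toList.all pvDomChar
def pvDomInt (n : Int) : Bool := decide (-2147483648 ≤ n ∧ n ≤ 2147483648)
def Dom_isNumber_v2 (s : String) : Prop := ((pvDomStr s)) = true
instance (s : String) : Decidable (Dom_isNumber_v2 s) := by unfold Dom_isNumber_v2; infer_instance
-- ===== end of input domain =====

-- B replaces A's table-driven DFA by a recursive-descent parser of the number grammar; alternative, same cost.

-- ===== PORT A =====
-- the DFA transition table ls_state (dict action-name -> successor state)
def lsStateA : List (PySem.Dict String Nat) :=
  [PySem.Dict.ofList [],
   PySem.Dict.ofList [("blank", 1), ("sign", 2), ("digit", 3), ("dot", 4)],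
   PySem.Dict.ofList [("digit", 3), ("dot", 4)],
   PySem.Dict.ofList [("digit", 3), ("dot", 5), ("e|E", 6), ("blank", 9)],
   PySem.Dict.ofList [("digit", 5)],
   PySem.Dict.ofList [("digit", 5), ("e|E", 6), ("blank", 9)],
   PySem.Dict.ofList [("sign", 7), ("digit", 8)],
   PySem.Dict.ofList [("digit", 8)],
   PySem.Dict.ofList [("digit", 8), ("blank", 9)],
   PySem.Dict.ofList [("blank", 9)]]

def strToActionA (c : Char) : Option String :=
  if '0' ≤ c && c ≤ '9' then some "digit"
  else if c == '+' || c == '-' then some "sign"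
  else if c == 'e' || c == 'E' then some "e|E"
  else if c == '.' then some "dot"
  else if c == ' ' then some "blank"
  else none

-- one iteration of A's loop; `none` = the early `return False`
def stepA (st : Option Nat) (c : Char) : Option Nat :=
  match st with
  | none => none
  | some cur =>
    match strToActionA c with
    | none => none
    | some a =>
      match (lsStateA.getD cur PySem.Dict.empty).get? a with
      | none => none
      | some nxt => some nxt

def isNumber_v2 (s : String) : Bool :=
  match s.toList.foldl stepA (some 1) with
  | none => false
  | some q => q == 3 || q == 5 || q == 8 || q == 9

-- ===== PORT B =====
-- _skip_digits: length of the maximal leading digit run, and the remainder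
def skipDigitsB : List Char → Nat × List Char
  | [] => (0, [])
  | c :: t =>
    if '0' ≤ c && c ≤ '9' then
      let r := skipDigitsB t
      (r.1 + 1, r.2)
    else (0, c :: t)

-- _exp_part
def expPartB (cs : List Char) : Bool :=
  match cs with
  | [] => true
  | c :: t =>
    if !(c == 'e' || c == 'E') then false
    else
      let t2 := if PySem.List.slice t none (some 1) = ['+'] ∨ PySem.List.slice t none (some 1) = ['-']
                then PySem.List.slice t (some 1) none else t
      let r := skipDigitsB t2
      decide (r.1 ≠ 0) && r.2.isEmpty

def isNumber_v2_alt (s : String) : Bool :=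
  let cs := PySem.Chars.stripChars s.toList [' ']
  let rest := if PySem.List.slice cs none (some 1) = ['+'] ∨ PySem.List.slice cs none (some 1) = ['-']
              then PySem.List.slice cs (some 1) none else cs
  let p := skipDigitsB rest
  let q := if PySem.List.slice p.2 none (some 1) = ['.']
           then skipDigitsB (PySem.List.slice p.2 (some 1) none)
           else ((0 : Nat), p.2)
  if p.1 + q.1 = 0 then false else expPartB q.2

-- ===== PRECONDITION & SPEC =====
def Spec_isNumber_v2 (s : String) (out : Bool) : Prop := out = isNumber_v2_alt s
instance (s : String) (out : Bool) : Decidable (Spec_isNumber_v2 s out) := by unfold Spec_isNumber_v2; infer_instance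

-- ===== CLAIM (what is proved, stated in full; the proofs are below) =====
def Claim_equal_isNumber_v2 : Prop := ∀ (s : String), Dom_isNumber_v2 s → Spec_isNumber_v2 s (isNumber_v2 s)

-- ===== LEMMAS AND PROOFS =====

-- proof-only model of the DFA on a finite state type
inductive PvSt | s1 | s2 | s3 | s4 | s5 | s6 | s7 | s8 | s9 deriving DecidableEq, Repr
inductive PvAct | digit | sign | ee | dot | blank deriving DecidableEq, Repr

def pvActOf (c : Char) : Option PvAct :=
  if '0' ≤ c && c ≤ '9' then some .digit
  else if c == '+' || c == '-' then some .sign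
  else if c == 'e' || c == 'E' then some .ee
  else if c == '.' then some .dot
  else if c == ' ' then some .blank
  else none

def pvDelta : PvSt → PvAct → Option PvSt
  | .s1, .blank => some .s1
  | .s1, .sign  => some .s2
  | .s1, .digit => some .s3
  | .s1, .dot   => some .s4
  | .s2, .digit => some .s3
  | .s2, .dot   => some .s4
  | .s3, .digit => some .s3
  | .s3, .dot   => some .s5
  | .s3, .ee    => some .s6
  | .s3, .blank => some .s9
  | .s4, .digit => some .s5
  | .s5, .digit => some .s5
  | .s5, .ee    => some .s6
  | .s5, .blank => some .s9
  | .s6, .sign  => some .s7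
  | .s6, .digit => some .s8
  | .s7, .digit => some .s8
  | .s8, .digit => some .s8
  | .s8, .blank => some .s9
  | .s9, .blank => some .s9
  | _, _ => none

def pvAccept : PvSt → Bool
  | .s3 | .s5 | .s8 | .s9 => true
  | _ => false

def pvN : PvSt → List Char → Bool
  | q, [] => pvAccept q
  | q, c :: t =>
    match pvActOf c with
    | none => false
    | some a =>
      match pvDelta q a with
      | none => false
      | some q' => pvN q' t

def pvEnc : PvSt → Nat
  | .s1 => 1 | .s2 => 2 | .s3 => 3 | .s4 => 4 | .s5 => 5 | .s6 => 6 | .s7 => 7 | .s8 => 8 | .s9 => 9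

theorem pvStepA_enc (q : PvSt) (c : Char) :
    stepA (some (pvEnc q)) c = ((pvActOf c).bind (pvDelta q)).map pvEnc := by
  cases q <;> unfold stepA strToActionA pvActOf <;> split_ifs <;> rfl

theorem pvFoldA_none (l : List Char) : l.foldl stepA none = none := by
  induction l with
  | nil => rfl
  | cons c t ih => simpa [stepA] using ih

theorem pvRunA (l : List Char) : ∀ q : PvSt,
    (match l.foldl stepA (some (pvEnc q)) with
     | none => false
     | some m => m == 3 || m == 5 || m == 8 || m == 9) = pvN q l := by
  induction l with
  | nil => intro q; cases q <;> rfl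
  | cons c t ih =>
    intro q
    rw [List.foldl_cons, pvStepA_enc]
    rcases hA : pvActOf c with _ | a
    · simp [pvN, hA, pvFoldA_none]
    · rcases hD : pvDelta q a with _ | q'
      · simp [pvN, hA, hD, pvFoldA_none]
      · simpa [pvN, hA, hD] using ih q'

theorem pvA_eq_N (s : String) : isNumber_v2 s = pvN .s1 s.toList := by
  unfold isNumber_v2
  exact pvRunA s.toList .s1

-- character classification used by both sides
theorem pvAct_cases (c : Char) :
    (pvActOf c = some .digit ∧ ('0' ≤ c && c ≤ '9') = true) ∨
    (pvActOf c = some .sign ∧ (c = '+' ∨ c = '-') ∧ ('0' ≤ c && c ≤ '9') = false) ∨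
    (pvActOf c = some .ee ∧ (c = 'e' ∨ c = 'E') ∧ ('0' ≤ c && c ≤ '9') = false) ∨
    (pvActOf c = some .dot ∧ c = '.' ) ∨
    (pvActOf c = some .blank ∧ c = ' ') ∨
    (pvActOf c = none ∧ ('0' ≤ c && c ≤ '9') = false ∧ c ≠ '+' ∧ c ≠ '-' ∧ c ≠ 'e' ∧ c ≠ 'E' ∧ c ≠ '.' ∧ c ≠ ' ') := by
  unfold pvActOf
  split_ifs with h1 h2 h3 h4 h5 <;> simp_all

theorem pvSlice_take1 (l : List Char) : PySem.List.slice l none (some 1) = l.take 1 := by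
  simpa using PySem.List.slice_to (xs := l) (b := 1) (by norm_num)

theorem pvSlice_drop1 (l : List Char) : PySem.List.slice l (some 1) none = l.tail :=
  PySem.List.slice_from_one l

theorem pvLast_tail {c : Char} {t : List Char} (h : (c :: t).getLast? ≠ some ' ') :
    t.getLast? ≠ some ' ' := by
  cases t with
  | nil => simp
  | cons d u => simpa [List.getLast?_cons_cons] using h

theorem pvL9 : ∀ l : List Char, l ≠ [] → l.getLast? ≠ some ' ' → pvN .s9 l = false := by
  intro l
  induction l with
  | nil => simp
  | cons c t ih =>
    intro _ hlast
    rcases pvAct_cases c with ⟨hA, _⟩ | ⟨hA, _, _⟩ | ⟨hA, _, _⟩ | ⟨hA, _⟩ | ⟨hA, hc⟩ | ⟨hA, _⟩ <;>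
      simp [pvN, hA, pvDelta]
    subst hc
    cases t with
    | nil => simp at hlast
    | cons d u => exact ih (by simp) (pvLast_tail hlast)

theorem pvL8 : ∀ l : List Char, l.getLast? ≠ some ' ' →
    pvN .s8 l = (skipDigitsB l).2.isEmpty := by
  intro l
  induction l with
  | nil => simp [pvN, pvAccept, skipDigitsB]
  | cons c t ih =>
    intro hlast
    rcases pvAct_cases c with ⟨hA, hd⟩ | ⟨hA, hc, hd⟩ | ⟨hA, hc, hd⟩ | ⟨hA, hc⟩ | ⟨hA, hc⟩ | ⟨hA, hd, _⟩
    · simp [pvN, hA, pvDelta, skipDigitsB, hd, ih (pvLast_tail hlast)]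
    · rcases hc with hc | hc <;> subst hc <;> simp [pvN, hA, pvDelta, skipDigitsB]
    · rcases hc with hc | hc <;> subst hc <;> simp [pvN, hA, pvDelta, skipDigitsB]
    · subst hc; simp [pvN, hA, pvDelta, skipDigitsB]
    · subst hc
      cases t with
      | nil => simp at hlast
      | cons d u =>
        simpa [pvN, hA, pvDelta, skipDigitsB] using pvL9 (d :: u) (by simp) (pvLast_tail hlast)
    · simp [pvN, hA, skipDigitsB, hd]

theorem pvL7 : ∀ l : List Char, l.getLast? ≠ some ' ' →
    pvN .s7 l = (decide ((skipDigitsB l).1 ≠ 0) && (skipDigitsB l).2.isEmpty) := by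
  intro l hlast
  cases l with
  | nil => simp [pvN, pvAccept, skipDigitsB]
  | cons c t =>
    rcases pvAct_cases c with ⟨hA, hd⟩ | ⟨hA, hc, hd⟩ | ⟨hA, hc, hd⟩ | ⟨hA, hc⟩ | ⟨hA, hc⟩ | ⟨hA, hd, _⟩
    · simp [pvN, hA, pvDelta, skipDigitsB, hd, pvL8 t (pvLast_tail hlast)]
    · rcases hc with hc | hc <;> subst hc <;> simp [pvN, hA, pvDelta, skipDigitsB]
    · rcases hc with hc | hc <;> subst hc <;> simp [pvN, hA, pvDelta, skipDigitsB]
    · subst hc; simp [pvN, hA, pvDelta, skipDigitsB]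
    · subst hc; simp [pvN, hA, pvDelta, skipDigitsB]
    · simp [pvN, hA, skipDigitsB, hd]

theorem pvL6 : ∀ l : List Char, l.getLast? ≠ some ' ' →
    pvN .s6 l = expPartB ('e' :: l) := by
  intro l hlast
  cases l with
  | nil => simp [pvN, pvAccept, expPartB, skipDigitsB, pvSlice_take1]
  | cons c t =>
    rcases pvAct_cases c with ⟨hA, hd⟩ | ⟨hA, hc, hd⟩ | ⟨hA, hc, hd⟩ | ⟨hA, hc⟩ | ⟨hA, hc⟩ | ⟨hA, hd, h1, h2, _, _, _, _⟩
    · simp [pvN, hA, pvDelta, expPartB, skipDigitsB, hd, pvSlice_take1,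
        pvL8 t (pvLast_tail hlast),
        show ¬(c = '+' ∨ c = '-') from by rintro (rfl | rfl) <;> simp_all]
    · rcases hc with hc | hc <;> subst hc <;>
        simp [pvN, hA, pvDelta, expPartB, pvSlice_take1, pvSlice_drop1,
          pvL7 t (pvLast_tail hlast)]
    · rcases hc with hc | hc <;> subst hc <;>
        simp [pvN, hA, pvDelta, expPartB, skipDigitsB, pvSlice_take1]
    · subst hc; simp [pvN, hA, pvDelta, expPartB, skipDigitsB, pvSlice_take1]
    · subst hc; simp [pvN, hA, pvDelta, expPartB, skipDigitsB, pvSlice_take1]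
    · simp [pvN, hA, expPartB, skipDigitsB, pvSlice_take1, hd,
        show ¬(c = '+' ∨ c = '-') from by rintro (rfl | rfl) <;> simp_all]

theorem pvL5 : ∀ l : List Char, l.getLast? ≠ some ' ' →
    pvN .s5 l = expPartB (skipDigitsB l).2 := by
  intro l
  induction l with
  | nil => simp [pvN, pvAccept, skipDigitsB, expPartB]
  | cons c t ih =>
    intro hlast
    rcases pvAct_cases c with ⟨hA, hd⟩ | ⟨hA, hc, hd⟩ | ⟨hA, hc, hd⟩ | ⟨hA, hc⟩ | ⟨hA, hc⟩ | ⟨hA, hd, _, _, he, hE, _, _⟩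
    · simp [pvN, hA, pvDelta, skipDigitsB, hd, ih (pvLast_tail hlast)]
    · rcases hc with hc | hc <;> subst hc <;> simp [pvN, hA, pvDelta, skipDigitsB, expPartB]
    · rcases hc with hc | hc <;> subst hc <;>
        simpa [pvN, hA, pvDelta, skipDigitsB, expPartB] using pvL6 t (pvLast_tail hlast)
    · subst hc; simp [pvN, hA, pvDelta, skipDigitsB, expPartB]
    · subst hc
      cases t with
      | nil => simp at hlast
      | cons d u =>
        simpa [pvN, hA, pvDelta, skipDigitsB, expPartB] using
          pvL9 (d :: u) (by simp) (pvLast_tail hlast)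
    · simp [pvN, hA, skipDigitsB, hd, expPartB, he, hE]

theorem pvL4 : ∀ l : List Char, l.getLast? ≠ some ' ' →
    pvN .s4 l = (if (skipDigitsB l).1 = 0 then false else expPartB (skipDigitsB l).2) := by
  intro l hlast
  cases l with
  | nil => simp [pvN, pvAccept, skipDigitsB]
  | cons c t =>
    rcases pvAct_cases c with ⟨hA, hd⟩ | ⟨hA, hc, hd⟩ | ⟨hA, hc, hd⟩ | ⟨hA, hc⟩ | ⟨hA, hc⟩ | ⟨hA, hd, _⟩
    · simp [pvN, hA, pvDelta, skipDigitsB, hd, pvL5 t (pvLast_tail hlast)]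
    · rcases hc with hc | hc <;> subst hc <;> simp [pvN, hA, pvDelta, skipDigitsB]
    · rcases hc with hc | hc <;> subst hc <;> simp [pvN, hA, pvDelta, skipDigitsB]
    · subst hc; simp [pvN, hA, pvDelta, skipDigitsB]
    · subst hc; simp [pvN, hA, pvDelta, skipDigitsB]
    · simp [pvN, hA, skipDigitsB, hd]

-- the parse of the string after an (optional, already removed) sign
def pvParse2 (m : List Char) : Bool :=
  let p := skipDigitsB m
  let q := if PySem.List.slice p.2 none (some 1) = ['.']
           then skipDigitsB (PySem.List.slice p.2 (some 1) none)
           else ((0 : Nat), p.2)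
  if p.1 + q.1 = 0 then false else expPartB q.2

theorem pvL3 : ∀ l : List Char, l.getLast? ≠ some ' ' →
    pvN .s3 l = (if PySem.List.slice (skipDigitsB l).2 none (some 1) = ['.']
                 then expPartB (skipDigitsB (PySem.List.slice (skipDigitsB l).2 (some 1) none)).2
                 else expPartB (skipDigitsB l).2) := by
  intro l
  induction l with
  | nil => simp [pvN, pvAccept, skipDigitsB, expPartB, pvSlice_take1]
  | cons c t ih =>
    intro hlast
    rcases pvAct_cases c with ⟨hA, hd⟩ | ⟨hA, hc, hd⟩ | ⟨hA, hc, hd⟩ | ⟨hA, hc⟩ | ⟨hA, hc⟩ | ⟨hA, hd, _, _, he, hE, hdot, _⟩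
    · simp [pvN, hA, pvDelta, skipDigitsB, hd, ih (pvLast_tail hlast)]
    · rcases hc with hc | hc <;> subst hc <;>
        simp [pvN, hA, pvDelta, skipDigitsB, pvSlice_take1, expPartB]
    · rcases hc with hc | hc <;> subst hc <;>
        simpa [pvN, hA, pvDelta, skipDigitsB, pvSlice_take1, expPartB] using
          pvL6 t (pvLast_tail hlast)
    · subst hc
      simp [pvN, hA, pvDelta, skipDigitsB, pvSlice_take1, pvSlice_drop1,
        pvL5 t (pvLast_tail hlast)]
    · subst hc
      cases t with
      | nil => simp at hlast
      | cons d u =>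
        simpa [pvN, hA, pvDelta, skipDigitsB, pvSlice_take1] using
          pvL9 (d :: u) (by simp) (pvLast_tail hlast)
    · simp [pvN, hA, skipDigitsB, pvSlice_take1, hd, hdot, expPartB, he, hE]

theorem pvL2 : ∀ l : List Char, l.getLast? ≠ some ' ' →
    pvN .s2 l = pvParse2 l := by
  intro l hlast
  cases l with
  | nil => simp [pvN, pvAccept, pvParse2, skipDigitsB, pvSlice_take1]
  | cons c t =>
    rcases pvAct_cases c with ⟨hA, hd⟩ | ⟨hA, hc, hd⟩ | ⟨hA, hc, hd⟩ | ⟨hA, hc⟩ | ⟨hA, hc⟩ | ⟨hA, hd, _, _, _, _, hdot, _⟩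
    · have h3 := pvL3 t (pvLast_tail hlast)
      simp only [pvN, hA, pvDelta, pvParse2, skipDigitsB, hd, if_true]
      simp [h3]
      split_ifs <;> simp_all
    · rcases hc with hc | hc <;> subst hc <;>
        simp [pvN, hA, pvDelta, pvParse2, skipDigitsB, pvSlice_take1]
    · rcases hc with hc | hc <;> subst hc <;>
        simp [pvN, hA, pvDelta, pvParse2, skipDigitsB, pvSlice_take1]
    · subst hc
      simpa [pvN, hA, pvDelta, pvParse2, skipDigitsB, pvSlice_take1, pvSlice_drop1] using
        pvL4 t (pvLast_tail hlast)
    · subst hc; simp [pvN, hA, pvDelta, pvParse2, skipDigitsB, pvSlice_take1]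
    · simp [pvN, hA, pvParse2, skipDigitsB, pvSlice_take1, hd, hdot]

theorem pvLT : ∀ l : List Char, l.head? ≠ some ' ' → l.getLast? ≠ some ' ' →
    pvN .s1 l =
      (if PySem.List.slice l none (some 1) = ['+'] ∨ PySem.List.slice l none (some 1) = ['-']
       then pvParse2 (PySem.List.slice l (some 1) none) else pvParse2 l) := by
  intro l hhead hlast
  cases l with
  | nil => simp [pvN, pvAccept, pvParse2, skipDigitsB, pvSlice_take1]
  | cons c t =>
    rcases pvAct_cases c with ⟨hA, hd⟩ | ⟨hA, hc, hd⟩ | ⟨hA, hc, hd⟩ | ⟨hA, hc⟩ | ⟨hA, hc⟩ | ⟨hA, hd, h1, h2, _, _, hdot, _⟩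
    · have hns : ¬(c = '+' ∨ c = '-') := by rintro (rfl | rfl) <;> simp_all
      have heq : pvN PvSt.s1 (c :: t) = pvN PvSt.s2 (c :: t) := by
        simp [pvN, hA, pvDelta]
      rw [heq, pvL2 (c :: t) hlast]
      simp [pvSlice_take1, hns]
    · rcases hc with hc | hc <;> subst hc <;>
        simpa [pvN, hA, pvDelta, pvSlice_take1, pvSlice_drop1] using pvL2 t (pvLast_tail hlast)
    · rcases hc with hc | hc <;> subst hc <;>
        simp [pvN, hA, pvDelta, pvParse2, skipDigitsB, pvSlice_take1]
    · subst hc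
      have : pvN PvSt.s1 ('.' :: t) = pvN PvSt.s2 ('.' :: t) := by
        simp [pvN, hA, pvDelta]
      rw [this, pvL2 ('.' :: t) hlast]
      simp [pvSlice_take1]
    · subst hc; simp_all
    · have hns : ¬(c = '+' ∨ c = '-') := by rintro (rfl | rfl) <;> simp_all
      have : pvN PvSt.s1 (c :: t) = pvN PvSt.s2 (c :: t) := by
        simp [pvN, hA]
      rw [this, pvL2 (c :: t) hlast]
      simp [pvSlice_take1, hns]

-- leading blanks keep the DFA in state 1
theorem pvS1 : ∀ l : List Char, pvN .s1 l = pvN .s1 (l.dropWhile (fun c => c == ' ')) := by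
  intro l
  induction l with
  | nil => rfl
  | cons c t ih =>
    by_cases hc : c = ' '
    · subst hc
      simpa [pvN, List.dropWhile_cons, show pvActOf ' ' = some PvAct.blank from rfl, pvDelta]
        using ih
    · simp [hc]

theorem pvNspaces : ∀ (r : List Char) (q : PvSt), (∀ c ∈ r, c = ' ') → pvN q r = pvAccept q := by
  intro r
  induction r with
  | nil => intro q _; rfl
  | cons c t ih =>
    intro q hsp
    have hc : c = ' ' := hsp c (by simp)
    subst hc
    have ht : ∀ c ∈ t, c = ' ' := fun c hc => hsp c (by simp [hc])
    cases q <;>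
      simp [pvN, show pvActOf ' ' = some PvAct.blank from rfl, pvDelta, ih _ ht, pvAccept]

theorem pvAppendSpaces : ∀ (l r : List Char) (q : PvSt), (∀ c ∈ r, c = ' ') →
    pvN q (l ++ r) = pvN q l := by
  intro l
  induction l with
  | nil =>
    intro r q hsp
    simp [pvNspaces r q hsp, pvN]
  | cons c t ih =>
    intro r q hsp
    rcases hA : pvActOf c with _ | a
    · simp [pvN, hA]
    · rcases hD : pvDelta q a with _ | q'
      · simp [pvN, hA, hD]
      · simpa [pvN, hA, hD] using ih r q' hsp

theorem pvStrip_eq (l : List Char) :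
    PySem.Chars.stripChars l [' '] =
      ((l.dropWhile (fun c => c == ' ')).reverse.dropWhile (fun c => c == ' ')).reverse := by
  have hc : ∀ c : Char, List.contains [' '] c = (c == ' ') := by
    intro c
    by_cases h : c = ' ' <;> simp [List.contains_eq_mem, h]
  unfold PySem.Chars.stripChars
  simp only [hc]

theorem pvHead_dropWhile (p : Char → Bool) :
    ∀ (l : List Char) (a : Char), (l.dropWhile p).head? = some a → p a = false := by
  intro l
  induction l with
  | nil => simp
  | cons c t ih =>
    intro a h
    by_cases hp : p c
    · rw [List.dropWhile_cons_of_pos hp] at h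
      exact ih a h
    · rw [List.dropWhile_cons_of_neg hp] at h
      simp only [List.head?_cons, Option.some.injEq] at h
      subst h
      simpa using hp

theorem pvB_eq (s : String) :
    isNumber_v2_alt s = pvParse2
      (if PySem.List.slice (PySem.Chars.stripChars s.toList [' ']) none (some 1) = ['+'] ∨
          PySem.List.slice (PySem.Chars.stripChars s.toList [' ']) none (some 1) = ['-']
       then PySem.List.slice (PySem.Chars.stripChars s.toList [' ']) (some 1) none
       else PySem.Chars.stripChars s.toList [' ']) := rfl

theorem pvMain : ∀ s : String, isNumber_v2 s = isNumber_v2_alt s := by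
  intro s
  rw [pvA_eq_N, pvB_eq, pvStrip_eq]
  have hdecomp : s.toList.dropWhile (fun c => c == ' ') =
      ((s.toList.dropWhile (fun c => c == ' ')).reverse.dropWhile (fun c => c == ' ')).reverse ++
      ((s.toList.dropWhile (fun c => c == ' ')).reverse.takeWhile (fun c => c == ' ')).reverse := by
    conv_lhs => rw [← List.reverse_reverse (s.toList.dropWhile (fun c => c == ' ')),
      ← List.takeWhile_append_dropWhile (p := fun c : Char => c == ' ')
        (l := (s.toList.dropWhile (fun c => c == ' ')).reverse)]
    rw [List.reverse_append]
  set dw := s.toList.dropWhile (fun c => c == ' ') with hdw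
  set core := (dw.reverse.dropWhile (fun c => c == ' ')).reverse with hcore
  set trail := (dw.reverse.takeWhile (fun c => c == ' ')).reverse with htrl
  have htrail : ∀ c ∈ trail, c = ' ' := by
    intro c hcmem
    have := List.mem_takeWhile_imp (List.mem_reverse.mp hcmem)
    simpa using this
  have hcorelast : core.getLast? ≠ some ' ' := by
    rw [hcore, List.getLast?_reverse]
    intro h
    have := pvHead_dropWhile (fun c => c == ' ') dw.reverse ' ' h
    simp at this
  have hdwhead : dw.head? ≠ some ' ' := by
    intro h
    have := pvHead_dropWhile (fun c => c == ' ') s.toList ' ' h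
    simp at this
  have hcorehead : core.head? ≠ some ' ' := by
    cases hc : core with
    | nil => simp
    | cons d u =>
      intro hh
      simp at hh
      apply hdwhead
      rw [hdecomp, hc, hh]
      rfl
  calc pvN .s1 s.toList = pvN .s1 dw := pvS1 s.toList
    _ = pvN .s1 (core ++ trail) := by rw [← hdecomp]
    _ = pvN .s1 core := pvAppendSpaces core trail .s1 htrail
    _ = _ := by rw [pvLT core hcorehead hcorelast, ← apply_ite pvParse2]
-- ===== VERDICT (by name: the statement is the Claim_ definition above) =====
theorem isNumber_v2_spec : Claim_equal_isNumber_v2 := by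
  intro s _
  unfold Spec_isNumber_v2
  exact pvMain s
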